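-- pv_equiv track=rewrite | github.com/7e62ce85/Oratio | oratio/pow_validator_service/app.py | check_difficulty
-- ===== SOURCE A (Python) =====
-- def check_difficulty(hash_hex: str, difficulty: int) -> bool:
--     """
--     해시의 앞 N비트가 0인지 확인
--
--     Args:
--         hash_hex: 16진수 해시 문자열
--         difficulty: 앞에서부터 0이어야 하는 비트 수
--
--     Returns:
--         조건 만족 여부
--     """
--     bits_checked = 0
--
--     for hex_char in hash_hex:
--         if bits_checked >= difficulty:
--             return True
--
--         # 16진수를 4비트 2진수로 변환
--         try:
--             nibble = int(hex_char, 16)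
--         except ValueError:
--             return False
--
--         # 각 비트 확인 (MSB부터)
--         for i in range(3, -1, -1):
--             if bits_checked >= difficulty:
--                 return True
--
--             bit = (nibble >> i) & 1
--             if bit != 0:
--                 return False
--
--             bits_checked += 1
--
--     return bits_checked >= difficulty
-- ===== SOURCE B (Python) =====
-- def check_difficulty(hash_hex: str, difficulty: int) -> bool:
--     """Closed-form check: difficulty//4 full-zero hex chars plus a shifted test on one boundary nibble."""
--     if difficulty <= 0:
--         return True
--     full, rem = divmod(difficulty, 4)
--     need = full + (1 if rem else 0)
--     if len(hash_hex) < need: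
--         return False
--     if hash_hex[:full] != '0' * full:
--         return False
--     if rem:
--         try:
--             v = int(hash_hex[full], 16)
--         except ValueError:
--             return False
--         return (v >> (4 - rem)) == 0
--     return True
-- ===== Notes on version B (the rewrite author's own statement) =====
-- stated objective: simpler
-- what changed: Replaces A's bit-by-bit loop with counter state by a closed-form decomposition difficulty = 4*full + rem: a single prefix comparison against '0'*full plus one shifted nibble test for the remainder.
import Mathlib
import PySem

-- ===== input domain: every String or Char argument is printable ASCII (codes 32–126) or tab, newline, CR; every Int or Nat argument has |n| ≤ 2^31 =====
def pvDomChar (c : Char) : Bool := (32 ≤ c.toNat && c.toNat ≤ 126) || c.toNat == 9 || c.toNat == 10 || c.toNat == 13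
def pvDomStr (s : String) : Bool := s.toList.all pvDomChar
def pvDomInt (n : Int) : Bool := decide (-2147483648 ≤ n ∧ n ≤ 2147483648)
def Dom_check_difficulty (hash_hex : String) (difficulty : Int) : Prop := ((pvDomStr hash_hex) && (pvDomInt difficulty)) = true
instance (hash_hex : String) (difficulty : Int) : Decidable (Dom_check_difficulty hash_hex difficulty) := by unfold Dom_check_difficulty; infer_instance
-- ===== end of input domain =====

-- B replaces A's bit-by-bit loop with the closed decomposition difficulty = 4*full + rem:
-- one prefix comparison against '0'*full plus a single shifted test on the boundary nibble (objective: simpler).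

-- ===== PORT A =====
-- int(c, 16) for ONE character: exact — a single char parses iff it is 0-9/a-f/A-F (whitespace,
-- '+', '-', '_' alone are a ValueError in Python).  Shared by both ports.
def hexVal? (c : Char) : Option Int :=
  if '0' ≤ c ∧ c ≤ '9' then some ((c.toNat - '0'.toNat : Nat) : Int)
  else if 'a' ≤ c ∧ c ≤ 'f' then some ((c.toNat - 'a'.toNat + 10 : Nat) : Int)
  else if 'A' ≤ c ∧ c ≤ 'F' then some ((c.toNat - 'A'.toNat + 10 : Nat) : Int)
  else none

-- the inner 'for i in range(3, -1, -1)' loop: .inl b = early return b, .inr bits = fall through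
-- Python's  nibble >> i  equals  nibble // 2**i  for EVERY int (>> floors), so it is ported as
-- PySem.Int.floordiv _ (2^i); Python's  x & 1  equals  x % 2  for EVERY int (both give the low
-- bit, nonnegative), so it is ported as PySem.Int.mod _ 2 — both exact
def innerA (nib difficulty : Int) : List Nat → Int → Sum Bool Int
  | [], bits => .inr bits
  | i :: is, bits =>
    if bits ≥ difficulty then .inl true
    else if PySem.Int.mod (PySem.Int.floordiv nib (2 ^ i)) 2 ≠ 0 then .inl false
    else innerA nib difficulty is (bits + 1)

-- the outer 'for hex_char in hash_hex' loop
def loopA (difficulty : Int) : List Char → Int → Bool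
  | [], bits => decide (bits ≥ difficulty)
  | c :: rest, bits =>
    if bits ≥ difficulty then true
    else
      match hexVal? c with
      | none => false
      | some nib =>
        match innerA nib difficulty [3, 2, 1, 0] bits with
        | .inl b => b
        | .inr bits' => loopA difficulty rest bits'

def check_difficulty (hash_hex : String) (difficulty : Int) : Bool :=
  loopA difficulty hash_hex.toList 0

-- ===== PORT B =====
def check_difficulty_alt (hash_hex : String) (difficulty : Int) : Bool :=
  if difficulty ≤ 0 then true
  else
    let full := PySem.Int.floordiv difficulty 4
    let rem := PySem.Int.mod difficulty 4
    let need := full + (if rem ≠ 0 then 1 else 0)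
    let cs := hash_hex.toList
    if (cs.length : Int) < need then false
    else if PySem.List.slice cs none (some full) ≠ List.replicate full.toNat '0' then false
    else if rem ≠ 0 then
      match PySem.List.pyGet? cs full with
      | none => false
      | some c =>
        match hexVal? c with
        | none => false
        | some v => decide (PySem.Int.floordiv v (2 ^ (4 - rem).toNat) = 0)
    else true

-- ===== PRECONDITION & SPEC =====
def Spec_check_difficulty (hash_hex : String) (difficulty : Int) (out : Bool) : Prop := out = check_difficulty_alt hash_hex difficulty
instance (hash_hex : String) (difficulty : Int) (out : Bool) : Decidable (Spec_check_difficulty hash_hex difficulty out) := by unfold Spec_check_difficulty; infer_instance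

-- ===== CLAIM (what is proved, stated in full; the proofs are below) =====
def Claim_equal_check_difficulty : Prop := ∀ (hash_hex : String) (difficulty : Int), Dom_check_difficulty hash_hex difficulty → Spec_check_difficulty hash_hex difficulty (check_difficulty hash_hex difficulty)

-- ===== LEMMAS AND PROOFS =====

-- middle spec: "the first d bits of cs, read as hex, are zero", consumed one nibble at a time
def gB : List Char → Int → Bool
  | [], d => if d ≤ 0 then true else false
  | c :: rest, d =>
    if d ≤ 0 then true
    else
      match hexVal? c with
      | none => false
      | some nib =>
        if 4 ≤ d then (if nib = 0 then gB rest (d - 4) else false)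
        else decide (PySem.Int.floordiv nib (2 ^ (4 - d.toNat)) = 0)

lemma char_toNat_le {a b : Char} (h : a ≤ b) : a.toNat ≤ b.toNat := Fin.mk_le_mk.mp h

lemma char_eq_of_toNat {a b : Char} (h : a.toNat = b.toNat) : a = b := by
  rw [← Char.ofNat_toNat a, ← Char.ofNat_toNat b, h]

lemma hexVal?_bounds {c : Char} {v : Int} (h : hexVal? c = some v) : 0 ≤ v ∧ v < 16 := by
  unfold hexVal? at h
  have e0 : '0'.toNat = 48 := rfl
  have e9 : '9'.toNat = 57 := rfl
  have ea : 'a'.toNat = 97 := rfl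
  have ef : 'f'.toNat = 102 := rfl
  have eA : 'A'.toNat = 65 := rfl
  have eF : 'F'.toNat = 70 := rfl
  split_ifs at h with h1 h2 h3
  · have hl := char_toNat_le h1.1; have hr := char_toNat_le h1.2
    rw [e0] at hl; rw [e9] at hr
    simp only [Option.some.injEq] at h
    subst h; rw [e0]; constructor <;> omega
  · have hl := char_toNat_le h2.1; have hr := char_toNat_le h2.2
    rw [ea] at hl; rw [ef] at hr
    simp only [Option.some.injEq] at h
    subst h; rw [ea]; constructor <;> omega
  · have hl := char_toNat_le h3.1; have hr := char_toNat_le h3.2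
    rw [eA] at hl; rw [eF] at hr
    simp only [Option.some.injEq] at h
    subst h; rw [eA]; constructor <;> omega

lemma hexVal?_eq_zero_iff (c : Char) : hexVal? c = some 0 ↔ c = '0' := by
  constructor
  · intro h
    unfold hexVal? at h
    have e0 : '0'.toNat = 48 := rfl
    have ea : 'a'.toNat = 97 := rfl
    have eA : 'A'.toNat = 65 := rfl
    split_ifs at h with h1 h2 h3
    · have hl := char_toNat_le h1.1
      rw [e0] at hl
      simp only [Option.some.injEq, e0] at h
      apply char_eq_of_toNat
      rw [e0]
      omega
    · exfalso
      simp only [Option.some.injEq, ea] at h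
      omega
    · exfalso
      simp only [Option.some.injEq, eA] at h
      omega
  · intro h; subst h; decide

lemma innerA_ge4 (nib bits diff : Int) (hd : 4 ≤ diff - bits) (h0 : 0 ≤ nib) (h16 : nib < 16) :
    innerA nib diff [3, 2, 1, 0] bits = if nib = 0 then .inr (bits + 4) else .inl false := by
  have g0 : ¬ bits ≥ diff := by omega
  have g1 : ¬ bits + 1 ≥ diff := by omega
  have g2 : ¬ bits + 1 + 1 ≥ diff := by omega
  have g3 : ¬ bits + 1 + 1 + 1 ≥ diff := by omega
  norm_num [innerA, g0, g1, g2, g3, PySem.Int.floordiv_eq_ediv_of_pos, PySem.Int.mod_eq_emod_of_pos]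
  split_ifs <;> simp_all <;> omega

lemma innerA_small (nib bits diff : Int) (hd1 : 1 ≤ diff - bits) (hd3 : diff - bits ≤ 3)
    (h0 : 0 ≤ nib) (h16 : nib < 16) :
    innerA nib diff [3, 2, 1, 0] bits = .inl (decide (PySem.Int.floordiv nib (2 ^ (4 - (diff - bits).toNat)) = 0)) := by
  have g0 : ¬ bits ≥ diff := by omega
  have hcase : diff - bits = 1 ∨ diff - bits = 2 ∨ diff - bits = 3 := by omega
  rcases hcase with h | h | h
  · have t1 : bits + 1 ≥ diff := by omega
    rw [h]
    norm_num [innerA, g0, t1, PySem.Int.floordiv_eq_ediv_of_pos, PySem.Int.mod_eq_emod_of_pos]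
    split_ifs <;> simp_all <;> omega
  · have g1 : ¬ bits + 1 ≥ diff := by omega
    have t2 : bits + 1 + 1 ≥ diff := by omega
    rw [h]
    norm_num [innerA, g0, g1, t2, PySem.Int.floordiv_eq_ediv_of_pos, PySem.Int.mod_eq_emod_of_pos]
    split_ifs <;> simp_all <;> omega
  · have g1 : ¬ bits + 1 ≥ diff := by omega
    have g2 : ¬ bits + 1 + 1 ≥ diff := by omega
    have t3 : bits + 1 + 1 + 1 ≥ diff := by omega
    rw [h]
    norm_num [innerA, g0, g1, g2, t3, PySem.Int.floordiv_eq_ediv_of_pos, PySem.Int.mod_eq_emod_of_pos]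
    split_ifs <;> simp_all <;> omega

lemma gB_cons_eq (c : Char) (rest : List Char) (d : Int) (hd : ¬ d ≤ 0) :
    gB (c :: rest) d =
      (match hexVal? c with
       | none => false
       | some nib =>
         if 4 ≤ d then (if nib = 0 then gB rest (d - 4) else false)
         else decide (PySem.Int.floordiv nib (2 ^ (4 - d.toNat)) = 0)) := by
  rw [gB, if_neg hd]

lemma gB_nonpos (cs : List Char) (d : Int) (hd : d ≤ 0) : gB cs d = true := by
  cases cs <;> simp [gB, hd]

lemma loopA_eq_gB (diff : Int) (cs : List Char) (bits : Int) :
    loopA diff cs bits = gB cs (diff - bits) := by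
  induction cs generalizing bits with
  | nil =>
    by_cases h : bits ≥ diff <;> simp [loopA, gB, h]
  | cons c rest ih =>
    by_cases hge : bits ≥ diff
    · simp [loopA, gB, hge, show diff - bits ≤ 0 by omega]
    · have hd1 : 1 ≤ diff - bits := by omega
      have hnle : ¬ diff - bits ≤ 0 := by omega
      cases hv : hexVal? c with
      | none => simp [loopA, gB, hge, hnle, hv]
      | some nib =>
        obtain ⟨hnn, hlt⟩ := hexVal?_bounds hv
        by_cases h4 : 4 ≤ diff - bits
        · simp only [loopA, gB_cons_eq c rest _ hnle, hv, if_neg hge, if_pos h4,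
            innerA_ge4 nib bits diff h4 hnn hlt]
          by_cases hz : nib = 0
          · simp only [hz, reduceIte]
            rw [ih]
            congr 1
            ring
          · simp [hz]
        · simp only [loopA, gB_cons_eq c rest _ hnle, hv, if_neg hge, if_neg h4,
            innerA_small nib bits diff hd1 (by omega) hnn hlt]

lemma gB_closed (cs : List Char) (d : Int) (hd : 0 < d) :
    gB cs d =
      (if (cs.length : Int) < PySem.Int.floordiv d 4 + (if PySem.Int.mod d 4 ≠ 0 then 1 else 0) then false
       else if PySem.List.slice cs none (some (PySem.Int.floordiv d 4)) ≠ List.replicate (PySem.Int.floordiv d 4).toNat '0' then false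
       else if PySem.Int.mod d 4 ≠ 0 then
         match PySem.List.pyGet? cs (PySem.Int.floordiv d 4) with
         | none => false
         | some c =>
           match hexVal? c with
           | none => false
           | some v => decide (PySem.Int.floordiv v (2 ^ (4 - PySem.Int.mod d 4).toNat) = 0)
       else true) := by
  rw [PySem.Int.floordiv_eq_ediv_of_pos (show (0:Int) < 4 by norm_num),
    PySem.Int.mod_eq_emod_of_pos (show (0:Int) < 4 by norm_num)]
  revert hd
  induction cs generalizing d with
  | nil =>
    intro hd
    rw [if_pos (by by_cases hr : d % 4 = 0 <;> simp [hr] <;> omega)]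
    simp [gB, show ¬ d ≤ 0 by omega]
  | cons c rest ih =>
    intro hd
    have hnle : ¬ d ≤ 0 := by omega
    by_cases hbig : 4 ≤ d
    · -- d ≥ 4: the head char consumes 4 bits
      have hq1 : 1 ≤ d / 4 := by omega
      have htn : (d / 4).toNat = ((d - 4) / 4).toNat + 1 := by omega
      have hslice : PySem.List.slice (c :: rest) none (some (d / 4)) =
          c :: rest.take (((d - 4) / 4).toNat) := by
        rw [PySem.List.slice_to _ (by omega), htn, List.take_succ_cons]
      have hrepl : List.replicate (d / 4).toNat '0' =
          '0' :: List.replicate (((d - 4) / 4).toNat) '0' := by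
        rw [htn, List.replicate_succ]
      by_cases hc : c = '0'
      · subst hc
        have hL : gB ('0' :: rest) d = gB rest (d - 4) := by
          rw [gB_cons_eq _ _ _ hnle, show hexVal? '0' = some 0 from rfl]
          simp [hbig]
        rw [hL]
        by_cases hd4 : d = 4
        · subst hd4
          rw [gB_nonpos rest (4 - 4) (by norm_num)]
          norm_num [hslice, hrepl]
          rw [PySem.List.slice_to _ (by norm_num : (0:Int) ≤ 1)]
          simp
        · -- d ≥ 5
          rw [ih (d - 4) (by omega),
            show d / 4 = (d - 4) / 4 + 1 from by omega,
            show d % 4 = (d - 4) % 4 from by omega]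
          set e : Int := (d - 4) / 4 with he
          have he0 : 0 ≤ e := by omega
          generalize ht : (if (d - 4) % 4 ≠ 0 then (1:Int) else 0) = t
          have ht01 : t = 0 ∨ t = 1 := by rw [← ht]; split <;> simp
          by_cases hlen : (rest.length : Int) < e + t
          · rw [if_pos hlen,
              if_pos (show ((('0' :: rest).length : Int)) < e + 1 + t from by
                simp only [List.length_cons]; push_cast; omega)]
          · rw [if_neg hlen,
              if_neg (show ¬ ((('0' :: rest).length : Int)) < e + 1 + t from by
                simp only [List.length_cons]; push_cast; omega)]
            have hslice' : PySem.List.slice ('0' :: rest) none (some (e + 1)) =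
                '0' :: rest.take e.toNat := by
              rw [PySem.List.slice_to _ (by omega),
                show (e + 1).toNat = e.toNat + 1 from by omega, List.take_succ_cons]
            rw [hslice', PySem.List.slice_to rest he0,
              show (e + 1).toNat = e.toNat + 1 from by omega, List.replicate_succ]
            by_cases hS : rest.take e.toNat = List.replicate e.toNat '0'
            · rw [if_neg (show ¬ (rest.take e.toNat ≠ List.replicate e.toNat '0') from by simp [hS]),
                if_neg (show ¬ ('0' :: rest.take e.toNat ≠ '0' :: List.replicate e.toNat '0') from by simp [hS])]
              by_cases hr : (d - 4) % 4 ≠ 0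
              · rw [if_pos hr, if_pos hr]
                have hget : PySem.List.pyGet? ('0' :: rest) (e + 1) =
                    PySem.List.pyGet? rest e := by
                  rw [show e + 1 = ((e.toNat + 1 : Nat) : Int) from by omega,
                    PySem.List.pyGet?_natCast, List.getElem?_cons_succ,
                    ← PySem.List.pyGet?_natCast, Int.toNat_of_nonneg he0]
                rw [hget]
              · rw [if_neg hr, if_neg hr]
            · rw [if_pos (show (rest.take e.toNat ≠ List.replicate e.toNat '0') from hS),
                if_pos (show ('0' :: rest.take e.toNat ≠ '0' :: List.replicate e.toNat '0') from by simp [hS])]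
      · -- head is not '0': both sides are false
        have hL : gB (c :: rest) d = false := by
          rw [gB_cons_eq _ _ _ hnle]
          cases hv : hexVal? c with
          | none => rfl
          | some nib =>
            have hnz : nib ≠ 0 := by
              intro h; subst h
              exact hc ((hexVal?_eq_zero_iff c).mp hv)
            simp [hbig, hnz]
        rw [hL]
        by_cases hlen : ((c :: rest).length : Int) < d / 4 + (if d % 4 ≠ 0 then 1 else 0)
        · rw [if_pos hlen]
        · rw [if_neg hlen, if_pos (by rw [hslice, hrepl]; simp [hc])]
    · -- 1 ≤ d ≤ 3: no full chars, one boundary nibble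
      have hq0 : d / 4 = 0 := by omega
      have hrd : d % 4 = d := by omega
      rw [if_neg (by
        rw [hq0, hrd, if_pos (show d ≠ 0 by omega)]
        simp only [List.length_cons]; push_cast; omega)]
      rw [if_neg (by rw [hq0, PySem.List.slice_to _ (le_refl (0:Int))]; simp)]
      rw [if_pos (show d % 4 ≠ 0 by omega)]
      have hget : PySem.List.pyGet? (c :: rest) (d / 4) = some c := by
        rw [hq0, show (0 : Int) = ((0 : Nat) : Int) from rfl, PySem.List.pyGet?_natCast]
        rfl
      rw [gB_cons_eq _ _ _ hnle]
      cases hv : hexVal? c with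
      | none => simp only [hget, hv]
      | some v =>
        simp only [hget, hv, if_neg hbig]
        rw [hrd, show ((4 : Int) - d).toNat = 4 - d.toNat from by omega]

-- ===== VERDICT (by name: the statement is the Claim_ definition above) =====
theorem check_difficulty_spec : Claim_equal_check_difficulty := by
  intro s d _
  unfold Spec_check_difficulty check_difficulty check_difficulty_alt
  rw [loopA_eq_gB, sub_zero]
  by_cases hd : d ≤ 0
  · rw [if_pos hd]
    exact gB_nonpos s.toList d hd
  · rw [if_neg hd]
    exact gB_closed s.toList d (by omega)
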